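-- pv_equiv track=rewrite | github.com/ferrolho/coding-challenges | 2018/09/analytic.py | scoring_order
-- ===== SOURCE A (Python) =====
-- MULTIPLE = 23
--
-- def scoring_order(num_players):
--     players = []
--     current_round = 0
--     marbles_counter = 1
--
--     while len(players) != num_players:
--         player = current_round % num_players + 1
--
--         if (current_round + 1) % MULTIPLE == 0:
--             marbles_counter -= 1
--             players.append(player)
--         else:
--             marbles_counter += 1
--
--         current_round += 1
--
--     return players
-- ===== SOURCE B (Python) =====
-- def scoring_order(num_players):
--     # k-th scoring player (0-based) scores on round 23*k + 22
--     return [(23 * k + 22) % num_players + 1 for k in range(num_players)]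
-- ===== Notes on version B (the rewrite author's own statement) =====
-- stated objective: faster
-- what changed: Replaces the 23*n-step round-by-round while-loop simulation (with a dead marbles counter) by a closed-form list comprehension: the k-th scorer plays on round 23k+22, so the list is [(23k+22) % n + 1 for k in range(n)].
import Mathlib
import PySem

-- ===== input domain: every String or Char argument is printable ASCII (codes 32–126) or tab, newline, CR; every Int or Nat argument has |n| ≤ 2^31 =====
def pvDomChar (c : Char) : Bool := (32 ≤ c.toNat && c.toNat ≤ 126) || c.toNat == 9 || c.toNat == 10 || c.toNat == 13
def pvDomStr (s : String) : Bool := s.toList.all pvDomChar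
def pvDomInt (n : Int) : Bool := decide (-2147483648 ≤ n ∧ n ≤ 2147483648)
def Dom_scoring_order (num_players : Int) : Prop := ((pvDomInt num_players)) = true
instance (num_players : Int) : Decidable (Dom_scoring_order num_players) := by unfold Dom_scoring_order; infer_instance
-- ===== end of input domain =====

-- B replaces A's 23*n-step round simulation (with an unused marbles counter) by the
-- closed-form list of scorers [(23k+22) % n + 1 for k in range(n)] (objective: faster, constant factor).


-- ===== PORT A =====
-- the while loop; fuel (23*num_players).toNat only makes it total — within Pre_ the
-- loop always exits by its own guard before the fuel runs out
def scoringLoopA (num_players : Int) : Nat → List Int → Int → Int → List Int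
  | 0, players, _, _ => players
  | fuel + 1, players, current_round, marbles_counter =>
    if (players.length : Int) = num_players then players
    else
      let player := PySem.Int.mod current_round num_players + 1
      if PySem.Int.mod (current_round + 1) 23 = 0 then
        scoringLoopA num_players fuel (players ++ [player]) (current_round + 1) (marbles_counter - 1)
      else
        scoringLoopA num_players fuel players (current_round + 1) (marbles_counter + 1)

def scoring_order (num_players : Int) : List Int :=
  scoringLoopA num_players (23 * num_players).toNat [] 0 1

-- ===== PORT B =====
def scoring_order_alt (num_players : Int) : List Int :=
  (PySem.List.pyRange 0 num_players 1).map
    (fun k => PySem.Int.mod (23 * k + 22) num_players + 1)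

-- ===== PRECONDITION & SPEC =====
-- A never returns for negative num_players (the while loop cannot terminate); Pre_ excludes exactly those.
def Pre_scoring_order (num_players : Int) : Prop := 0 ≤ num_players
instance (num_players : Int) : Decidable (Pre_scoring_order num_players) := by unfold Pre_scoring_order; infer_instance
def pvWitness_scoring_order : Int := 5

def Spec_scoring_order (num_players : Int) (out : List Int) : Prop := out = scoring_order_alt num_players
instance (num_players : Int) (out : List Int) : Decidable (Spec_scoring_order num_players out) := by unfold Spec_scoring_order; infer_instance

-- ===== CLAIM (what is proved, stated in full; the proofs are below) =====
def Claim_equal_scoring_order : Prop := ∀ (num_players : Int), Dom_scoring_order num_players → Pre_scoring_order num_players → Spec_scoring_order num_players (scoring_order num_players)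

-- ===== LEMMAS AND PROOFS =====

-- Loop invariant: with j players already scored, current round c in [23j, 23j+23),
-- the loop appends exactly the scorers with indices j..n-1.
lemma scoringLoopA_spec (n : Int) (hn : 0 < n) :
    ∀ (fuel : Nat) (j : Nat) (c mc : Int) (players : List Int),
      players.length = j → 23 * (j : Int) ≤ c → c < 23 * (j : Int) + 23 →
      c ≤ 23 * n → 23 * n ≤ c + fuel →
      scoringLoopA n fuel players c mc =
        players ++ (List.range (n.toNat - j)).map
          (fun (i : Nat) => PySem.Int.mod (23 * ((j : Int) + (i : Nat)) + 22) n + 1) := by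
  intro fuel
  induction fuel with
  | zero =>
    intro j c mc players hlen h1 h2 h3 h4
    have : n.toNat - j = 0 := by omega
    simp [scoringLoopA, this]
  | succ fuel ih =>
    intro j c mc players hlen h1 h2 h3 h4
    by_cases hj : (j : Int) = n
    · have : n.toNat - j = 0 := by omega
      simp [scoringLoopA, hlen, hj, this]
    · have hjn : (j : Int) < n := by omega
      have hguard : ¬ ((players.length : Int) = n) := by rw [hlen]; exact hj
      have hmodc : PySem.Int.mod (c + 1) 23 = 0 ↔ (23 : Int) ∣ (c + 1) :=
        PySem.Int.mod_eq_zero_iff_dvd _ _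
      have hrange : n.toNat - j = (n.toNat - (j + 1)) + 1 := by omega
      by_cases hc : c = 23 * (j : Int) + 22
      · -- scoring round: append and advance to the next block
        have hdvd : (23 : Int) ∣ (c + 1) := ⟨(j : Int) + 1, by omega⟩
        rw [show scoringLoopA n (fuel + 1) players c mc =
              scoringLoopA n fuel
                (players ++ [PySem.Int.mod c n + 1]) (c + 1) (mc - 1) by
          simp [scoringLoopA, hguard, hdvd]]
        have hmap : (List.range (n.toNat - j)).map
              (fun (i : Nat) => PySem.Int.mod (23 * ((j : Int) + (i : Nat)) + 22) n + 1)
            = (PySem.Int.mod c n + 1) ::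
              (List.range (n.toNat - (j + 1))).map
                (fun (i : Nat) =>
                  PySem.Int.mod (23 * (((j + 1 : Nat) : Int) + (i : Nat)) + 22) n + 1) := by
          rw [hrange, List.range_succ_eq_map, List.map_cons, List.map_map]
          congr 1
          · have harg : 23 * ((j : Int) + ((0 : Nat) : Int)) + 22 = c := by push_cast; omega
            rw [harg]
          · apply List.map_congr_left
            intro i _
            simp only [Function.comp, Nat.succ_eq_add_one]
            have harg : 23 * ((j : Int) + ((i + 1 : Nat) : Int)) + 22
                = 23 * (((j + 1 : Nat) : Int) + (i : Nat)) + 22 := by push_cast; ring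
            rw [harg]
        rw [hmap,
          ih (j + 1) (c + 1) (mc - 1) _ (by simp [hlen]) (by push_cast; omega)
            (by push_cast; omega) (by omega) (by push_cast at h4 ⊢; omega)]
        simp
      · -- non-scoring round: same players, next round
        have hndvd : ¬ ((23 : Int) ∣ (c + 1)) := by
          intro ⟨q, hq⟩
          omega
        rw [show scoringLoopA n (fuel + 1) players c mc =
              scoringLoopA n fuel players (c + 1) (mc + 1) by
          simp [scoringLoopA, hguard, hndvd]]
        exact ih j (c + 1) (mc + 1) players hlen (by omega) (by omega) (by omega)
          (by push_cast at h4 ⊢; omega)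

-- ===== VERDICT (by name: the statement is the Claim_ definition above) =====
theorem scoring_order_spec : Claim_equal_scoring_order := by
  intro n _ hpre
  unfold Spec_scoring_order scoring_order scoring_order_alt
  rcases lt_or_eq_of_le hpre with hn | hn
  · rw [scoringLoopA_spec n hn _ 0 0 1 [] rfl (by omega) (by omega) (by omega)
        (by omega)]
    rw [PySem.List.pyRange_one, List.map_map]
    simp only [List.nil_append, Nat.sub_zero, sub_zero]
    apply List.map_congr_left
    intro i _
    simp only [Function.comp]
    norm_num
  · subst hn
    simp [scoringLoopA]
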